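-- pv_equiv track=rewrite | github.com/Hidden-History/ai-memory | src/memory/security_scanner.py | _segment_text
-- ===== SOURCE A (Python) =====
-- def _segment_text(text: str, max_chars: int = 2000) -> list[str]:
--     """Segment long texts for NER processing (BP-084)."""
--     if len(text) <= max_chars:
--         return [text]
--
--     segments = []
--     current = ""
--
--     for para in text.split("\n\n"):
--         if len(para) > max_chars:
--             # Oversized paragraph: split on sentence boundaries
--             for sentence in para.split(". "):
--                 piece = sentence + ". " if not sentence.endswith(".") else sentence
--                 if len(current) + len(piece) > max_chars:
--                     if current:
--                         segments.append(current)
--                     current = piece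
--                 else:
--                     current = f"{current}{piece}" if current else piece
--         elif len(current) + len(para) > max_chars:
--             if current:
--                 segments.append(current)
--             current = para
--         else:
--             current = f"{current}\n\n{para}" if current else para
--
--     if current:
--         segments.append(current)
--
--     return segments
-- ===== SOURCE B (Python) =====
-- def _segment_text(text: str, max_chars: int = 2000) -> list[str]:
--     """Segment long texts for NER (two-pass: tokenize into (sep, unit), then greedy pack)."""
--     if len(text) <= max_chars:
--         return [text]
--
--     # Pass 1: flatten the text into (separator, unit) tokens.
--     tokens = []
--     for para in text.split("\n\n"):
--         if len(para) > max_chars: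
--             tokens += [("", s if s.endswith(".") else s + ". ")
--                        for s in para.split(". ")]
--         else:
--             tokens.append(("\n\n", para))
--
--     # Pass 2: one greedy packing loop over the tokens.
--     segments = []
--     current = ""
--     for sep, unit in tokens:
--         if len(current) + len(unit) > max_chars:
--             if current:
--                 segments.append(current)
--             current = unit
--         else:
--             current = current + sep + unit if current else unit
--     if current:
--         segments.append(current)
--     return segments
-- ===== Notes on version B (the rewrite author's own statement) =====
-- stated objective: alternative
-- what changed: A's single nested-loop pass is replaced by a two-phase pipeline: first flatten the text into a list of (separator, unit) tokens (oversized paragraphs exploded into sentence pieces, others kept whole), then run one uniform greedy packing loop over that token list.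
import Mathlib
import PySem

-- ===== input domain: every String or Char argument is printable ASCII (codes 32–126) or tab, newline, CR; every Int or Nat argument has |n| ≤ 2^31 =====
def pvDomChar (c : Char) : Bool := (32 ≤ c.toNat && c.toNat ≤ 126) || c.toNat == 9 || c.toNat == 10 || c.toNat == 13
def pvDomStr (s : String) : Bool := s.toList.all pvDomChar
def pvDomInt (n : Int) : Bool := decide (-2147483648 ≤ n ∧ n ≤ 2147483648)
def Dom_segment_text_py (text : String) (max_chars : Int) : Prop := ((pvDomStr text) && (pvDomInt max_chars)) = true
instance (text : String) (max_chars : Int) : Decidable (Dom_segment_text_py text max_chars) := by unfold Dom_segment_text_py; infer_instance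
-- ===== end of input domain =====

-- B replaces A's nested loops by a tokenize-then-pack pipeline (same cost, plainer structure).
-- Both ports work on List Char (PySem.Chars) and rebuild Strings at the end.

-- ===== PORT A =====
-- inner loop body: for sentence in para.split(". "): …
def aSentenceStep (max_chars : Int) (st : List (List Char) × List Char) (sentence : List Char) :
    List (List Char) × List Char :=
  let piece := if ¬ PySem.Chars.endswith sentence ['.'] then sentence ++ ['.', ' '] else sentence
  if PySem.Chars.len st.2 + PySem.Chars.len piece > max_chars then
    ((if st.2 ≠ [] then st.1 ++ [st.2] else st.1), piece)
  else
    (st.1, if st.2 ≠ [] then st.2 ++ piece else piece)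

-- outer loop body: for para in text.split("\n\n"): …
def aParaStep (max_chars : Int) (st : List (List Char) × List Char) (para : List Char) :
    List (List Char) × List Char :=
  if PySem.Chars.len para > max_chars then
    (PySem.Chars.splitOn para ['.', ' ']).foldl (aSentenceStep max_chars) st
  else if PySem.Chars.len st.2 + PySem.Chars.len para > max_chars then
    ((if st.2 ≠ [] then st.1 ++ [st.2] else st.1), para)
  else
    (st.1, if st.2 ≠ [] then st.2 ++ ['\n', '\n'] ++ para else para)

def segment_text_py (text : String) (max_chars : Int) : List String :=
  if PySem.Str.len text ≤ max_chars then [text]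
  else
    let st := (PySem.Chars.splitOn text.toList ['\n', '\n']).foldl (aParaStep max_chars) ([], [])
    ((if st.2 ≠ [] then st.1 ++ [st.2] else st.1)).map String.ofList

-- ===== PORT B =====
-- pass 1: the (separator, unit) tokens contributed by one paragraph
def bTokens (max_chars : Int) (para : List Char) : List (List Char × List Char) :=
  if PySem.Chars.len para > max_chars then
    (PySem.Chars.splitOn para ['.', ' ']).map
      (fun s => ([], if PySem.Chars.endswith s ['.'] then s else s ++ ['.', ' ']))
  else [(['\n', '\n'], para)]

-- pass 2: one greedy packing step over a (separator, unit) token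
def bPackStep (max_chars : Int) (st : List (List Char) × List Char)
    (tok : List Char × List Char) : List (List Char) × List Char :=
  if PySem.Chars.len st.2 + PySem.Chars.len tok.2 > max_chars then
    ((if st.2 ≠ [] then st.1 ++ [st.2] else st.1), tok.2)
  else
    (st.1, if st.2 ≠ [] then st.2 ++ tok.1 ++ tok.2 else tok.2)

def segment_text_py_alt (text : String) (max_chars : Int) : List String :=
  if PySem.Str.len text ≤ max_chars then [text]
  else
    let toks := (PySem.Chars.splitOn text.toList ['\n', '\n']).flatMap (bTokens max_chars)
    let st := toks.foldl (bPackStep max_chars) ([], [])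
    ((if st.2 ≠ [] then st.1 ++ [st.2] else st.1)).map String.ofList

-- ===== PRECONDITION & SPEC =====
def Spec_segment_text_py (text : String) (max_chars : Int) (out : List String) : Prop := out = segment_text_py_alt text max_chars
instance (text : String) (max_chars : Int) (out : List String) : Decidable (Spec_segment_text_py text max_chars out) := by unfold Spec_segment_text_py; infer_instance

-- ===== CLAIM (what is proved, stated in full; the proofs are below) =====
def Claim_equal_segment_text_py : Prop := ∀ (text : String) (max_chars : Int), Dom_segment_text_py text max_chars → Spec_segment_text_py text max_chars (segment_text_py text max_chars)

-- ===== LEMMAS AND PROOFS =====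

-- one A sentence-step is one B pack-step on the corresponding ("", piece) token
lemma sentenceStep_eq_packStep (mc : Int) (st : List (List Char) × List Char) (s : List Char) :
    aSentenceStep mc st s
      = bPackStep mc st ([], if PySem.Chars.endswith s ['.'] then s else s ++ ['.', ' ']) := by
  simp only [aSentenceStep, bPackStep]
  by_cases h : PySem.Chars.endswith s ['.'] <;> simp [h]

-- one A paragraph-step equals packing the paragraph's tokens
lemma paraStep_eq_pack (mc : Int) (st : List (List Char) × List Char) (p : List Char) :
    aParaStep mc st p = (bTokens mc p).foldl (bPackStep mc) st := by
  simp only [aParaStep, bTokens]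
  by_cases h : PySem.Chars.len p > mc
  · simp only [if_pos h, List.foldl_map]
    exact PySem.List.foldl_congr_mem _ _ _ _ (fun st' s _ => sentenceStep_eq_packStep mc st' s)
  · simp only [if_neg h, List.foldl_cons, List.foldl_nil, bPackStep, List.append_assoc]

-- folding A's paragraph steps equals packing the flattened token list
lemma fold_paras_eq_pack_tokens (mc : Int) (paras : List (List Char))
    (st : List (List Char) × List Char) :
    paras.foldl (aParaStep mc) st
      = (paras.flatMap (bTokens mc)).foldl (bPackStep mc) st := by
  induction paras generalizing st with
  | nil => rfl
  | cons p rest ih =>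
      simp only [List.foldl_cons, List.flatMap_cons, List.foldl_append]
      rw [paraStep_eq_pack]; exact ih _

-- ===== VERDICT (by name: the statement is the Claim_ definition above) =====
theorem segment_text_py_spec : Claim_equal_segment_text_py := by
  intro text max_chars _
  unfold Spec_segment_text_py segment_text_py segment_text_py_alt
  by_cases h : PySem.Str.len text ≤ max_chars
  · rw [if_pos h, if_pos h]
  · rw [if_neg h, if_neg h]
    rw [fold_paras_eq_pack_tokens]
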